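-- pv_equiv track=rewrite | github.com/MohammadIzza/PBOWEEK2 | PerangOdev.py | arrPasukan
-- ===== SOURCE A (Python) =====
-- def arrPasukan(pasukan, arr, newArr):
--     if len(arr) == 0:
--         return newArr
--     if pasukan == "Oddlings":
--         if arr[0] % 2 == 1:
--             newArr.append(arr[0])
--             return arrPasukan("Oddlings", arr[1:], newArr)
--         return arrPasukan("Oddlings", arr[1:], newArr)
--
--     elif pasukan == "Evenly":
--         if arr[0] % 2 == 0:
--             newArr.append(arr[0])
--             return arrPasukan("Evenly", arr[1:], newArr)
--         return arrPasukan("Evenly", arr[1:], newArr)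
-- ===== SOURCE B (Python) =====
-- def arrPasukan(pasukan, arr, newArr):
--     # Iterative re-implementation: one loop per team branch instead of
--     # slice-per-call recursion. Mutates newArr in place like A.
--     if len(arr) == 0:
--         return newArr
--     if pasukan == "Oddlings":
--         for x in arr:
--             if x % 2 == 1:
--                 newArr.append(x)
--         return newArr
--     elif pasukan == "Evenly":
--         for x in arr:
--             if x % 2 == 0:
--                 newArr.append(x)
--         return newArr
-- ===== Notes on version B (the rewrite author's own statement) =====
-- stated objective: simpler
-- what changed: Replaces the slice-per-element recursion with a single iterative for-loop per team branch appending into newArr.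
-- outside the precondition, e.g. on arrPasukan('X', [1], []): A returns None, B returns None
import Mathlib
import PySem

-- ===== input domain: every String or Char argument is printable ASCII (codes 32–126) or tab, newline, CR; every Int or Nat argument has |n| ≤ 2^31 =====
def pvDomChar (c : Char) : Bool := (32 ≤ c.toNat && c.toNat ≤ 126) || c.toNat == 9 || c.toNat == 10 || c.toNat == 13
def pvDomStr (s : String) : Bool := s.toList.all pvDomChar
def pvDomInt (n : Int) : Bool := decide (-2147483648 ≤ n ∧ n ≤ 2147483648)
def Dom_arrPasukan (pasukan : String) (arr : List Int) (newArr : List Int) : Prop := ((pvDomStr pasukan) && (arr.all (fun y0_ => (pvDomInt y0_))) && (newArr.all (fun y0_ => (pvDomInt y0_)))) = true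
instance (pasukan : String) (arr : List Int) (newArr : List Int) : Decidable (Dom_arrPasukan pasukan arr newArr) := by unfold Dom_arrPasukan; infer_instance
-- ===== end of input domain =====

-- B replaces A's slice-per-element recursion with one iterative loop per team branch (objective: simpler).
-- Python note: both A and B mutate the passed-in newArr in place; the equivalence proved here is about the return value.


-- ===== PORT A =====
-- Literal transliteration of A's recursion; arr[0]/arr[1:] become head/tail of the
-- cons cell; '%' is Python's floored mod (PySem.Int.mod). On an unknown team with
-- non-empty arr Python falls through and returns None (not a List Int): that input
-- is excluded by Pre_arrPasukan; the port returns [] there only to be total.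
def arrPasukan (pasukan : String) (arr : List Int) (newArr : List Int) : List Int :=
  match arr with
  | [] => newArr
  | x :: rest =>
    if pasukan == "Oddlings" then
      if PySem.Int.mod x 2 == 1 then
        arrPasukan "Oddlings" rest (newArr ++ [x])
      else
        arrPasukan "Oddlings" rest newArr
    else if pasukan == "Evenly" then
      if PySem.Int.mod x 2 == 0 then
        arrPasukan "Evenly" rest (newArr ++ [x])
      else
        arrPasukan "Evenly" rest newArr
    else [] -- Python: implicit None; outside Pre_arrPasukan

-- ===== PORT B =====
-- Transliteration of Source B: each 'for x in arr' loop is a foldl appending to newArr.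
def arrPasukan_alt (pasukan : String) (arr : List Int) (newArr : List Int) : List Int :=
  if arr.length == 0 then newArr
  else if pasukan == "Oddlings" then
    arr.foldl (fun acc x => if PySem.Int.mod x 2 == 1 then acc ++ [x] else acc) newArr
  else if pasukan == "Evenly" then
    arr.foldl (fun acc x => if PySem.Int.mod x 2 == 0 then acc ++ [x] else acc) newArr
  else [] -- Python: implicit None; outside Pre_arrPasukan

-- ===== PRECONDITION & SPEC =====
-- Pre_ excludes unknown teams with non-empty arr: there Python A (and B) falls off the
-- end of the function and returns None, which is not a value of the List Int type.
def Pre_arrPasukan (pasukan : String) (arr : List Int) (newArr : List Int) : Prop :=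
  arr = [] ∨ pasukan = "Oddlings" ∨ pasukan = "Evenly"
instance (pasukan : String) (arr : List Int) (newArr : List Int) : Decidable (Pre_arrPasukan pasukan arr newArr) := by unfold Pre_arrPasukan; infer_instance

def pvWitness_arrPasukan : String × List Int × List Int := ("Oddlings", [1, 2, 3], [0])

def Spec_arrPasukan (pasukan : String) (arr : List Int) (newArr : List Int) (out : List Int) : Prop := out = arrPasukan_alt pasukan arr newArr
instance (pasukan : String) (arr : List Int) (newArr : List Int) (out : List Int) : Decidable (Spec_arrPasukan pasukan arr newArr out) := by unfold Spec_arrPasukan; infer_instance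

-- ===== CLAIM (what is proved, stated in full; the proofs are below) =====
def Claim_equal_arrPasukan : Prop := ∀ (pasukan : String) (arr : List Int) (newArr : List Int), Dom_arrPasukan pasukan arr newArr → Pre_arrPasukan pasukan arr newArr → Spec_arrPasukan pasukan arr newArr (arrPasukan pasukan arr newArr)

-- ===== LEMMAS AND PROOFS =====

theorem arrPasukan_odd_foldl : ∀ (arr newArr : List Int),
    arrPasukan "Oddlings" arr newArr
      = arr.foldl (fun acc x => if PySem.Int.mod x 2 == 1 then acc ++ [x] else acc) newArr := by
  intro arr
  induction arr with
  | nil => intro newArr; simp [arrPasukan]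
  | cons x rest ih =>
    intro newArr
    by_cases h : x % 2 = 1 <;> simp [arrPasukan, ih, h]

theorem arrPasukan_even_foldl : ∀ (arr newArr : List Int),
    arrPasukan "Evenly" arr newArr
      = arr.foldl (fun acc x => if PySem.Int.mod x 2 == 0 then acc ++ [x] else acc) newArr := by
  intro arr
  induction arr with
  | nil => intro newArr; simp [arrPasukan]
  | cons x rest ih =>
    intro newArr
    by_cases h : (2:Int) ∣ x <;> simp [arrPasukan, ih, h]

-- ===== VERDICT (by name: the statement is the Claim_ definition above) =====
theorem arrPasukan_spec : Claim_equal_arrPasukan := by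
  intro pasukan arr newArr _ hpre
  unfold Spec_arrPasukan arrPasukan_alt
  rcases hpre with h | h | h
  · subst h; simp [arrPasukan]
  · subst h
    cases arr with
    | nil => simp [arrPasukan]
    | cons x rest => simpa using arrPasukan_odd_foldl (x :: rest) newArr
  · subst h
    cases arr with
    | nil => simp [arrPasukan]
    | cons x rest => simpa using arrPasukan_even_foldl (x :: rest) newArr
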